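-- pv_equiv track=rewrite | github.com/justdoths-dev/trading-bot | src/research/diagnostics/executable_entry_scarcity_diagnosis_report.py | _primary_stage
-- ===== SOURCE A (Python) =====
-- _PRIMARY_STAGE_ORDER = {
--     "positive_entry_scarcity_among_execution_allowed": 0,
--     "execution_gate_scarcity": 1,
--     "hold_row_dominance": 2,
--     "no_upstream_collapse_detected": 3,
-- }
--
-- def _primary_stage(stage_losses: dict[str, int]) -> str:
--     candidates = [(name, max(int(count or 0), 0)) for name, count in stage_losses.items()]
--     top_name, top_count = min(
--         candidates,
--         key=lambda item: (-item[1], _PRIMARY_STAGE_ORDER.get(item[0], 99)),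
--     )
--     if top_count <= 0:
--         return "no_upstream_collapse_detected"
--     return top_name
-- ===== SOURCE B (Python) =====
-- _PRIMARY_STAGE_ORDER = {
--     "positive_entry_scarcity_among_execution_allowed": 0,
--     "execution_gate_scarcity": 1,
--     "hold_row_dominance": 2,
--     "no_upstream_collapse_detected": 3,
-- }
--
--
-- def _primary_stage(stage_losses: dict[str, int]) -> str:
--     # Stable two-pass sort (radix style): order by stage priority first, then by
--     # clamped count descending; stability makes the head the max-count entry with
--     # the smallest stage order (unknown names rank after the known ones).
--     by_order = sorted(
--         stage_losses.items(),
--         key=lambda kv: _PRIMARY_STAGE_ORDER.get(kv[0], 99),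
--     )
--     ranked = sorted(by_order, key=lambda kv: max(int(kv[1] or 0), 0), reverse=True)
--     name, count = ranked[0]
--     if max(int(count or 0), 0) <= 0:
--         return "no_upstream_collapse_detected"
--     return name
-- ===== Notes on version B (the rewrite author's own statement) =====
-- stated objective: alternative
-- what changed: A's single-pass min() with the composite key (-count, stage-order) is replaced by a sort-based selection: two stable sorts (by stage order, then by clamped count descending) whose stability resolves the ties, and the answer is the head of the ranked list.
import Mathlib
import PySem

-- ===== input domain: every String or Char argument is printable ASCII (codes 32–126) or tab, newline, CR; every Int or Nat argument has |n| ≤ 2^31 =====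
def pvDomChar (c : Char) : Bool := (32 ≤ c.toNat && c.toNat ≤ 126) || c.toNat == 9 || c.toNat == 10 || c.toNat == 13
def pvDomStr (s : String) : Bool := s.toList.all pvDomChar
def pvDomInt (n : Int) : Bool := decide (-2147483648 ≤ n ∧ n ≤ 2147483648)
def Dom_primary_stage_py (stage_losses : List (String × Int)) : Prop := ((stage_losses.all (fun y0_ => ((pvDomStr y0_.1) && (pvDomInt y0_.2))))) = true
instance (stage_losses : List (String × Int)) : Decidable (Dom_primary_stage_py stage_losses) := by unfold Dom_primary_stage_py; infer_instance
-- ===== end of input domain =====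

-- B replaces A's single min() with composite key by a sort-based selection: two stable
-- sorts (by stage order, then by clamped count descending) and the head of the result
-- (objective: alternative; same return value, not claimed faster).

-- ===== PORT A =====
-- module constant _PRIMARY_STAGE_ORDER (shared by both ports, as in the Python module)
def pvOrder : PySem.Dict String Int := PySem.Dict.ofList
  [("positive_entry_scarcity_among_execution_allowed", 0),
   ("execution_gate_scarcity", 1),
   ("hold_row_dominance", 2),
   ("no_upstream_collapse_detected", 3)]

-- _PRIMARY_STAGE_ORDER.get(name, 99)
def pvOrdOf (name : String) : Int := PySem.Dict.getD pvOrder name 99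

-- note: counts are ints, so 'int(count or 0)' is just 'count' (0 stays 0)
def primary_stage_py (stage_losses : List (String × Int)) : String :=
  let candidates := stage_losses.map (fun p => (p.1, max p.2 0))
  match PySem.List.min2? candidates (fun item => -item.2) (fun item => pvOrdOf item.1) with
  | some (top_name, top_count) =>
      if top_count ≤ 0 then "no_upstream_collapse_detected" else top_name
  | none => ""  -- empty dict: Python's min() raises ValueError (excluded by Pre_)

-- ===== PORT B =====
-- key lambdas of B's two sorted() calls
def pvK2 (kv : String × Int) : Int := pvOrdOf kv.1
def pvCnt (kv : String × Int) : Int := max kv.2 0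

def primary_stage_py_alt (stage_losses : List (String × Int)) : String :=
  let by_order := PySem.List.sorted stage_losses pvK2 false
  let ranked := PySem.List.sorted by_order pvCnt true
  match ranked with
  | [] => ""  -- empty dict: ranked[0] raises IndexError (excluded by Pre_)
  | kv :: _ => if max kv.2 0 ≤ 0 then "no_upstream_collapse_detected" else kv.1

-- ===== PRECONDITION & SPEC =====
-- Pre_ excludes only the empty dict, on which A raises ValueError (min() of an empty sequence).
def Pre_primary_stage_py (stage_losses : List (String × Int)) : Prop := stage_losses ≠ []
instance (stage_losses : List (String × Int)) : Decidable (Pre_primary_stage_py stage_losses) := by unfold Pre_primary_stage_py; infer_instance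

def pvWitness_primary_stage_py : (List (String × Int)) := [("hold_row_dominance", 2), ("zz", 2)]

def Spec_primary_stage_py (stage_losses : List (String × Int)) (out : String) : Prop := out = primary_stage_py_alt stage_losses
instance (stage_losses : List (String × Int)) (out : String) : Decidable (Spec_primary_stage_py stage_losses out) := by unfold Spec_primary_stage_py; infer_instance

-- ===== CLAIM (what is proved, stated in full; the proofs are below) =====
def Claim_equal_primary_stage_py : Prop := ∀ (stage_losses : List (String × Int)), Dom_primary_stage_py stage_losses → Pre_primary_stage_py stage_losses → Spec_primary_stage_py stage_losses (primary_stage_py stage_losses)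

-- ===== LEMMAS AND PROOFS =====

-- A's selection rule, inlined: the newcomer x beats the current best m iff
-- pvCnt m < pvCnt x ∨ (pvCnt m ≤ pvCnt x ∧ pvK2 x < pvK2 m)
def pvStep (acc : Option (String × Int)) (x : String × Int) : Option (String × Int) :=
  match acc with
  | none => some x
  | some m => if (pvCnt m < pvCnt x ∨ (pvCnt m ≤ pvCnt x ∧ pvK2 x < pvK2 m)) then some x else some m

lemma pvStep_some (m x : String × Int) :
    pvStep (some m) x = if (pvCnt m < pvCnt x ∨ (pvCnt m ≤ pvCnt x ∧ pvK2 x < pvK2 m)) then some x else some m := rfl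

-- first-maximal element (by pvCnt) of a list, recursively
def pvFMax : List (String × Int) → Option (String × Int)
  | [] => none
  | y :: t =>
      match pvFMax t with
      | none => some y
      | some m => if pvCnt y < pvCnt m then some m else some y

lemma pvFMax_cons_none {t : List (String × Int)} (y : String × Int)
    (ht : pvFMax t = none) : pvFMax (y :: t) = some y := by
  unfold pvFMax; rw [ht]

lemma pvFMax_cons_some {t : List (String × Int)} {m : String × Int} (y : String × Int)
    (ht : pvFMax t = some m) :
    pvFMax (y :: t) = if pvCnt y < pvCnt m then some m else some y := by
  unfold pvFMax; rw [ht]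

def pvStepMax (acc : Option (String × Int)) (x : String × Int) : Option (String × Int) :=
  match acc with
  | none => some x
  | some m => if pvCnt m < pvCnt x then some x else some m

lemma pvFMax_mem {l : List (String × Int)} {m : String × Int}
    (h : pvFMax l = some m) : m ∈ l := by
  induction l with
  | nil => simp [pvFMax] at h
  | cons y t ih =>
      cases ht : pvFMax t with
      | none => rw [pvFMax_cons_none y ht] at h; cases h; simp
      | some m' =>
          rw [pvFMax_cons_some y ht] at h
          split at h <;> cases h
          · exact List.mem_cons_of_mem _ (ih ht)
          · simp

lemma pvFMax_ne_none {y : String × Int} {t : List (String × Int)} :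
    pvFMax (y :: t) ≠ none := by
  cases ht : pvFMax t with
  | none => rw [pvFMax_cons_none y ht]; simp
  | some m => rw [pvFMax_cons_some y ht]; split <;> simp

def pvJoin (a : String × Int) : Option (String × Int) → String × Int
  | none => a
  | some m => if pvCnt a < pvCnt m then m else a

lemma pvJoin_none (a : String × Int) : pvJoin a none = a := rfl

lemma pvJoin_some (a m : String × Int) :
    pvJoin a (some m) = if pvCnt a < pvCnt m then m else a := rfl

lemma pvFMax_foldl_some (l : List (String × Int)) :
    ∀ a : String × Int, l.foldl pvStepMax (some a) = some (pvJoin a (pvFMax l)) := by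
  induction l with
  | nil => intro a; rfl
  | cons z t ih =>
      intro a
      have hz : pvStepMax (some a) z = if pvCnt a < pvCnt z then some z else some a := rfl
      rw [List.foldl_cons, hz]
      cases ht : pvFMax t with
      | none =>
          rw [pvFMax_cons_none z ht]
          by_cases h : pvCnt a < pvCnt z
          · rw [if_pos h, ih z, ht, pvJoin_none, pvJoin_some, if_pos h]
          · rw [if_neg h, ih a, ht, pvJoin_none, pvJoin_some, if_neg h]
      | some m =>
          rw [pvFMax_cons_some z ht]
          by_cases h : pvCnt a < pvCnt z
          · rw [if_pos h, ih z, ht, pvJoin_some]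
            split_ifs <;> simp only [pvJoin_some] <;> split_ifs <;> first | rfl | omega
          · rw [if_neg h, ih a, ht, pvJoin_some]
            split_ifs <;> simp only [pvJoin_some] <;> split_ifs <;> first | rfl | omega

lemma pvFMax_eq_foldl (l : List (String × Int)) :
    l.foldl pvStepMax none = pvFMax l := by
  cases l with
  | nil => rfl
  | cons y t =>
      have h0 : pvStepMax none y = some y := rfl
      rw [List.foldl_cons, h0, pvFMax_foldl_some]
      cases ht : pvFMax t with
      | none => rw [pvFMax_cons_none y ht, pvJoin_none]
      | some m =>
          rw [pvFMax_cons_some y ht, pvJoin_some]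
          split_ifs <;> rfl

-- head of the reverse-sorted list = the fold of pvStepMax over the unsorted list
lemma head_insertBy_rev (x : String × Int) (l : List (String × Int)) :
    (PySem.List.insertBy (fun a b => decide (pvCnt b < pvCnt a)) x l).head?
      = pvStepMax l.head? x := by
  cases l with
  | nil => rfl
  | cons y t =>
      simp only [PySem.List.insertBy, pvStepMax, List.head?]
      split_ifs with h h' h'
      · rfl
      · simp at h; omega
      · simp at h; omega
      · rfl

lemma head_foldl_insertBy_rev (xs : List (String × Int)) :
    ∀ acc : List (String × Int),
    (xs.foldl (fun acc x => PySem.List.insertBy (fun a b => decide (pvCnt b < pvCnt a)) x acc) acc).head?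
      = xs.foldl pvStepMax acc.head? := by
  induction xs with
  | nil => intro acc; rfl
  | cons x t ih =>
      intro acc
      simp only [List.foldl_cons, ih, head_insertBy_rev]

lemma head_sorted_rev (l : List (String × Int)) :
    (PySem.List.sorted l pvCnt true).head? = pvFMax l := by
  rw [PySem.List.sorted_rev_eq_foldl_insertBy, head_foldl_insertBy_rev, List.head?_nil,
    pvFMax_eq_foldl]

-- inserting x into a list sorted by pvK2: the first maximum updates exactly by A's rule
lemma pvFMax_insertBy (x : String × Int) (l : List (String × Int))
    (hp : l.Pairwise (fun a b => pvK2 a ≤ pvK2 b)) :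
    pvFMax (PySem.List.insertBy (fun a b => decide (pvK2 a < pvK2 b)) x l)
      = pvStep (pvFMax l) x := by
  induction l with
  | nil => rfl
  | cons y ys ih =>
      obtain ⟨hy, hp'⟩ := List.pairwise_cons.mp hp
      simp only [PySem.List.insertBy]
      split_ifs with hx
      · -- x goes in front: x :: y :: ys
        simp only [decide_eq_true_iff] at hx
        cases hm : pvFMax (y :: ys) with
        | none => exact absurd hm pvFMax_ne_none
        | some m =>
            have hmem : m ∈ y :: ys := pvFMax_mem hm
            have hym : pvK2 y ≤ pvK2 m := by
              rcases List.mem_cons.mp hmem with rfl | h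
              · exact le_refl _
              · exact hy m h
            rw [pvFMax_cons_some x hm, pvStep_some]
            split_ifs <;> first | rfl | omega
      · -- x goes into the tail: y :: insertBy x ys
        simp only [decide_eq_true_iff] at hx
        have hins := ih hp'
        cases hys : pvFMax ys with
        | none =>
            rw [hys] at hins
            have h1 : pvFMax (PySem.List.insertBy (fun a b => decide (pvK2 a < pvK2 b)) x ys)
                = some x := hins
            rw [pvFMax_cons_some y h1, pvFMax_cons_none y hys, pvStep_some]
            split_ifs <;> first | rfl | omega
        | some m =>
            have hym : pvK2 y ≤ pvK2 m := hy m (pvFMax_mem hys)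
            rw [hys, pvStep_some] at hins
            rw [pvFMax_cons_some y hys]
            by_cases hbx : (pvCnt m < pvCnt x ∨ (pvCnt m ≤ pvCnt x ∧ pvK2 x < pvK2 m))
            · have h1 : pvFMax (PySem.List.insertBy (fun a b => decide (pvK2 a < pvK2 b)) x ys)
                  = some x := by rw [hins, if_pos hbx]
              rw [pvFMax_cons_some y h1]
              by_cases hym2 : pvCnt y < pvCnt m
              · rw [if_pos hym2, pvStep_some]
                split_ifs <;> first | rfl | omega
              · rw [if_neg hym2, pvStep_some]
                split_ifs <;> first | rfl | omega
            · have h1 : pvFMax (PySem.List.insertBy (fun a b => decide (pvK2 a < pvK2 b)) x ys)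
                  = some m := by rw [hins, if_neg hbx]
              rw [pvFMax_cons_some y h1]
              by_cases hym2 : pvCnt y < pvCnt m
              · rw [if_pos hym2, pvStep_some]
                split_ifs; rfl
              · rw [if_neg hym2, pvStep_some]
                split_ifs <;> first | rfl | omega

-- the whole chain: first max of the stably order-sorted list = A's fold over the input
lemma pvFMax_sorted (xs : List (String × Int)) :
    pvFMax (PySem.List.sorted xs pvK2 false) = xs.foldl pvStep none := by
  induction xs using List.reverseRecOn with
  | nil => rfl
  | append_singleton ys x ih =>
      rw [PySem.List.sorted_eq_foldl_insertBy, List.foldl_append, List.foldl_cons,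
        List.foldl_nil, ← PySem.List.sorted_eq_foldl_insertBy,
        pvFMax_insertBy x _ (PySem.List.sorted_pairwise ys pvK2), ih,
        List.foldl_append, List.foldl_cons, List.foldl_nil]

-- A's lexicographic-key comparison, as a Bool, is exactly pvBetter
lemma pvBetter_decide (m p : String × Int) :
    (decide ((-(max p.2 0) : Int) < -(max m.2 0))
      || (!decide ((-(max m.2 0) : Int) < -(max p.2 0)) && decide (pvOrdOf p.1 < pvOrdOf m.1)))
      = decide ((pvCnt m < pvCnt p ∨ (pvCnt m ≤ pvCnt p ∧ pvK2 p < pvK2 m))) := by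
  rw [Bool.eq_iff_iff]
  simp only [Bool.or_eq_true, Bool.and_eq_true, Bool.not_eq_eq_eq_not, Bool.not_true,
    decide_eq_true_iff, decide_eq_false_iff_not]
  unfold pvCnt pvK2
  omega

-- A's min2? fold step, as a named function
def pvStepA (acc : Option (String × Int)) (x : String × Int) : Option (String × Int) :=
  match acc with
  | none => some x
  | some m =>
      if (decide ((-x.2 : Int) < -m.2) || (!decide ((-m.2 : Int) < -x.2) && decide (pvOrdOf x.1 < pvOrdOf m.1))) = true
      then some x else some m

lemma min2?_eq_foldl (l : List (String × Int)) :
    PySem.List.min2? l (fun item => -item.2) (fun item => pvOrdOf item.1)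
      = l.foldl pvStepA none := by
  unfold PySem.List.min2?
  exact PySem.List.foldl_congr_mem l _ pvStepA none (fun acc x _ => by cases acc <;> rfl)

-- A's min2? step over the clamped candidates is the image of pvStep
lemma stepA_map (acc : Option (String × Int)) (p : String × Int) :
    pvStepA (acc.map (fun p => (p.1, max p.2 0))) (p.1, max p.2 0)
      = (pvStep acc p).map (fun p => (p.1, max p.2 0)) := by
  cases acc with
  | none => rfl
  | some m =>
      show (if (decide ((-(max p.2 0) : Int) < -(max m.2 0))
          || (!decide ((-(max m.2 0) : Int) < -(max p.2 0)) && decide (pvOrdOf p.1 < pvOrdOf m.1))) = true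
        then some (p.1, max p.2 0) else some (m.1, max m.2 0))
        = (pvStep (some m) p).map (fun p => (p.1, max p.2 0))
      rw [pvBetter_decide, pvStep_some]
      by_cases hb : (pvCnt m < pvCnt p ∨ (pvCnt m ≤ pvCnt p ∧ pvK2 p < pvK2 m))
      · simp [hb]
      · simp [hb]

lemma min2?_map (xs : List (String × Int)) :
    ∀ acc : Option (String × Int),
    ((xs.map (fun p => (p.1, max p.2 0))).foldl pvStepA (acc.map (fun p => (p.1, max p.2 0))))
      = (xs.foldl pvStep acc).map (fun p => (p.1, max p.2 0)) := by
  induction xs with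
  | nil => intro acc; rfl
  | cons p t ih =>
      intro acc
      rw [List.map_cons, List.foldl_cons, List.foldl_cons, ← ih (pvStep acc p)]
      congr 1
      exact stepA_map acc p

lemma foldl_pvStep_ne_none (xs : List (String × Int)) (h : xs ≠ []) :
    xs.foldl pvStep none ≠ none := by
  cases xs with
  | nil => exact absurd rfl h
  | cons y t =>
      have hgen : ∀ (l : List (String × Int)) (a : String × Int),
          l.foldl pvStep (some a) ≠ none := by
        intro l
        induction l with
        | nil => intro a; simp
        | cons z u ih =>
            intro a
            rw [List.foldl_cons, pvStep_some]
            split_ifs <;> exact ih _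
      simpa using hgen t y

-- ===== VERDICT (by name: the statement is the Claim_ definition above) =====
theorem primary_stage_py_spec : Claim_equal_primary_stage_py := by
  intro xs _ hpre
  unfold Spec_primary_stage_py primary_stage_py primary_stage_py_alt
  show (match PySem.List.min2? (xs.map (fun p => (p.1, max p.2 0)))
          (fun item => -item.2) (fun item => pvOrdOf item.1) with
        | some (top_name, top_count) =>
            if top_count ≤ 0 then "no_upstream_collapse_detected" else top_name
        | none => "")
      = (match PySem.List.sorted (PySem.List.sorted xs pvK2 false) pvCnt true with
        | [] => ""
        | kv :: _ => if max kv.2 0 ≤ 0 then "no_upstream_collapse_detected" else kv.1)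
  have hA : PySem.List.min2? (xs.map (fun p => (p.1, max p.2 0)))
      (fun item => -item.2) (fun item => pvOrdOf item.1)
      = (xs.foldl pvStep none).map (fun p => (p.1, max p.2 0)) := by
    rw [min2?_eq_foldl]
    simpa only [Option.map_none] using min2?_map xs none
  have hB : (PySem.List.sorted (PySem.List.sorted xs pvK2 false) pvCnt true).head?
      = xs.foldl pvStep none := by
    rw [head_sorted_rev, pvFMax_sorted]
  cases hm : xs.foldl pvStep none with
  | none => exact absurd hm (foldl_pvStep_ne_none xs hpre)
  | some m =>
      rw [hm] at hA hB
      rw [hA, Option.map_some]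
      cases hr : PySem.List.sorted (PySem.List.sorted xs pvK2 false) pvCnt true with
      | nil => rw [hr] at hB; simp at hB
      | cons kv t =>
          rw [hr] at hB
          simp only [List.head?_cons, Option.some.injEq] at hB
          subst hB
          rfl
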